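-- pv_equiv track=rewrite | github.com/bangca85/python-for-kid | basic/buoi22/bai10.py | find_highest_payer
-- ===== SOURCE A (Python) =====
-- def find_highest_payer(customer_totals):
--     highest_customer = None
--     highest_total = 0
--
--     for customer, total in customer_totals.items():
--         if total > highest_total:
--             highest_total = total
--             highest_customer = customer
--
--     return highest_customer
-- ===== SOURCE B (Python) =====
-- def find_highest_payer(customer_totals):
--     ranked = sorted(customer_totals.items(), key=lambda kv: kv[1], reverse=True)
--     if ranked and ranked[0][1] > 0:
--         return ranked[0][0]
--     return None
-- ===== Notes on version B (the rewrite author's own statement) =====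
-- stated objective: alternative
-- what changed: Replaces the running-max scan with a stable descending sort of the items followed by a single head inspection (return the top customer only if its total is positive); stability preserves A's first-insertion tie-breaking.
import Mathlib
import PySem

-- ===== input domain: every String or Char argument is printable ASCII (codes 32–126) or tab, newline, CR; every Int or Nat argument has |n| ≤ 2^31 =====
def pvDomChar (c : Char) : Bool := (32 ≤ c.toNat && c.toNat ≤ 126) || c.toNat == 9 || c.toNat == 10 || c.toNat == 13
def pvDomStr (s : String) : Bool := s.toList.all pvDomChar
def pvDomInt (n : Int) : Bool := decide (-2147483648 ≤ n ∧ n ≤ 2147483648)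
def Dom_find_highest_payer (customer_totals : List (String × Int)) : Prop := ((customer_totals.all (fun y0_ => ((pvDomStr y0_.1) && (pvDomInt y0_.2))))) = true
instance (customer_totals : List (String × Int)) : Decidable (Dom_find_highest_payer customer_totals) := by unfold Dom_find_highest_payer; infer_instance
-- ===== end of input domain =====

-- B replaces A's running-max scan with a stable descending sort plus a head inspection
-- (alternative decomposition, not faster); return value only, no mutation involved.

-- ===== PORT A =====
-- literal port of A: running (highest_customer, highest_total) pair, updated on strict '>'
def find_highest_payer (customer_totals : List (String × Int)) : Option String :=
  (customer_totals.foldl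
    (fun st kv => if kv.2 > st.2 then (some kv.1, kv.2) else st)
    ((none : Option String), (0 : Int))).1

-- ===== PORT B =====
-- literal port of B: stable reverse sort by total (PySem.List.sorted = Python's sorted), then the head
def find_highest_payer_alt (customer_totals : List (String × Int)) : Option String :=
  match PySem.List.sorted customer_totals (fun kv => kv.2) true with
  | [] => none
  | (c, t) :: _ => if t > 0 then some c else none

-- ===== PRECONDITION & SPEC =====
def Spec_find_highest_payer (customer_totals : List (String × Int)) (out : Option String) : Prop := out = find_highest_payer_alt customer_totals
instance (customer_totals : List (String × Int)) (out : Option String) : Decidable (Spec_find_highest_payer customer_totals out) := by unfold Spec_find_highest_payer; infer_instance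

-- ===== CLAIM (what is proved, stated in full; the proofs are below) =====
def Claim_equal_find_highest_payer : Prop := ∀ (customer_totals : List (String × Int)), Dom_find_highest_payer customer_totals → Spec_find_highest_payer customer_totals (find_highest_payer customer_totals)

-- ===== LEMMAS AND PROOFS =====

-- coupling invariant: the head of B's insertion-sort accumulator determines A's fold state
def pvInv (acc : List (String × Int)) (st : Option String × Int) : Prop :=
  (acc = [] ∧ st = ((none : Option String), (0 : Int))) ∨
  (∃ h rest, acc = h :: rest ∧
    st = ((if 0 < h.2 then some h.1 else none), max h.2 0))

lemma pv_step (acc : List (String × Int)) (st : Option String × Int) (x : String × Int)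
    (hinv : pvInv acc st) :
    pvInv (PySem.List.insertBy (fun a b => decide (b.2 < a.2)) x acc)
      (if x.2 > st.2 then (some x.1, x.2) else st) := by
  rcases hinv with ⟨rfl, rfl⟩ | ⟨h, rest, rfl, rfl⟩
  · right
    refine ⟨x, [], by simp [PySem.List.insertBy], ?_⟩
    by_cases hx : 0 < x.2 <;> simp [hx] <;> omega
  · right
    by_cases hlt : h.2 < x.2
    · refine ⟨x, h :: rest, by simp [PySem.List.insertBy, hlt], ?_⟩
      by_cases hx : 0 < x.2
      · have : x.2 > max h.2 0 := by omega
        simp [this, hx]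
        omega
      · have h1 : ¬ (x.2 > max h.2 0) := by omega
        have h2 : ¬ (0 < h.2) := by omega
        simp [h1, h2, hx]
        omega
    · refine ⟨h, PySem.List.insertBy (fun a b => decide (b.2 < a.2)) x rest,
        by simp [PySem.List.insertBy, hlt], ?_⟩
      have h1 : ¬ (x.2 > max h.2 0) := by omega
      simp [h1]

lemma pv_couple : ∀ (l acc : List (String × Int)) (st : Option String × Int),
    pvInv acc st →
    pvInv (l.foldl (fun acc x => PySem.List.insertBy (fun a b => decide (b.2 < a.2)) x acc) acc)
      (l.foldl (fun st kv => if kv.2 > st.2 then (some kv.1, kv.2) else st) st)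
  | [], acc, st, hinv => hinv
  | x :: l, acc, st, hinv => pv_couple l _ _ (pv_step acc st x hinv)

-- ===== VERDICT (by name: the statement is the Claim_ definition above) =====
theorem find_highest_payer_spec : Claim_equal_find_highest_payer := by
  intro l _
  unfold Spec_find_highest_payer find_highest_payer find_highest_payer_alt
  rw [PySem.List.sorted_rev_eq_foldl_insertBy]
  have := pv_couple l [] ((none : Option String), (0 : Int)) (Or.inl ⟨rfl, rfl⟩)
  rcases this with ⟨he, hst⟩ | ⟨h, rest, he, hst⟩
  · simp [hst, he]
  · rw [hst, he]
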